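-- pv_equiv track=rewrite | github.com/Madjid-CH/aoc2024 | src/day6/day6.py | walk_down
-- ===== SOURCE A (Python) =====
-- def walk_down(grid, agent_position):
--     x, y = agent_position
--     for i in range(x, len(grid)):
--         if grid[i][y] == "#":
--             grid[i - 1][y] = "v"
--             return grid, (i - 1, y)
--         grid[i][y] = "X"
--     return grid, (len(grid) - 1, y)
-- ===== SOURCE B (Python) =====
-- def _put(row, y, v):
--     r = list(row)
--     r[y] = v
--     return r
--
--
-- def walk_down(grid, agent_position):
--     x, y = agent_position
--     stop = None
--     new_grid = []
--     for i, row in enumerate(grid):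
--         if stop is None and x <= i:
--             if row[y] == "#":
--                 stop = i
--                 new_grid.append(row)
--             else:
--                 new_grid.append(_put(row, y, "X"))
--         else:
--             new_grid.append(row)
--     if stop is None:
--         return new_grid, (len(grid) - 1, y)
--     new_grid[stop - 1] = _put(new_grid[stop - 1], y, "v")
--     return new_grid, (stop - 1, y)
-- ===== Notes on version B (the rewrite author's own statement) =====
-- stated objective: alternative
-- what changed: B replaces A's in-place early-return loop over row indices from x with a single stateful fold over enumerate(grid) that rebuilds the whole grid functionally (copying rows, marking the walked ones), recording the obstacle row in an accumulator and applying the final 'v' write afterwards.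
import Mathlib
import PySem

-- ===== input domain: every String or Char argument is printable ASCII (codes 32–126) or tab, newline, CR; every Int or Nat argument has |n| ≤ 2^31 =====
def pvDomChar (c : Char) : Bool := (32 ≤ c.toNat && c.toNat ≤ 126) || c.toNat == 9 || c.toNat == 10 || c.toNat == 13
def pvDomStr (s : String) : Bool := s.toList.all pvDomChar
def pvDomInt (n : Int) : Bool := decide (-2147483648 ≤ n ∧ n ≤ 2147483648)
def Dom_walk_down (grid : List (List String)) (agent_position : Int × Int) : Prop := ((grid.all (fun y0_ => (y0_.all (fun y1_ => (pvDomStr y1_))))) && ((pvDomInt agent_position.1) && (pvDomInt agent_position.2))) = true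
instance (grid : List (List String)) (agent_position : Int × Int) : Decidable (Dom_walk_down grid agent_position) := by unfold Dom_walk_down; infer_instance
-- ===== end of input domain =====

-- B rebuilds the grid in one stateful fold over enumerate(grid) (functional copy, no in-place
-- mutation, no early return) instead of A's in-place index loop; A mutates its grid argument,
-- B does not, so the equivalence proved here is about the returned value only.


-- Python's grid[i][y] read / grid[i][y] = v write (exact incl. negative wrap, under Pre_'s InRange)
def pvCell (grid : List (List String)) (i y : Int) : String :=
  PySem.List.pyGetD (PySem.List.pyGetD grid i []) y ""

def pvSetCell (grid : List (List String)) (i y : Int) (v : String) : List (List String) :=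
  PySem.List.pySetD grid i (PySem.List.pySetD (PySem.List.pyGetD grid i []) y v)

-- ===== PORT A =====
-- A's loop 'for i in range(x, len(grid))' with early return, fuel = number of remaining indices
def walkA_go (y : Int) (grid : List (List String)) (i : Int) (fuel : Nat) :
    List (List String) × (Int × Int) :=
  match fuel with
  | 0 => (grid, ((grid.length : Int) - 1, y))
  | Nat.succ n =>
    if pvCell grid i y == "#" then
      (pvSetCell grid (i - 1) y "v", (i - 1, y))
    else
      walkA_go y (pvSetCell grid i y "X") (i + 1) n

def walk_down (grid : List (List String)) (agent_position : Int × Int) :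
    List (List String) × (Int × Int) :=
  walkA_go agent_position.2 grid agent_position.1 ((grid.length - agent_position.1).toNat)

-- ===== PORT B =====
-- Source B's _put(row, y, v): copy the row, assign r[y] = v
def pvPut (row : List String) (y : Int) (v : String) : List String :=
  PySem.List.pySetD row y v

-- one iteration of Source B's 'for i, row in enumerate(grid)' loop body; state = (stop, new_grid)
def walkB_step (x y : Int) (st : Option Int × List (List String)) (p : Int × List String) :
    Option Int × List (List String) :=
  if st.1 = none ∧ x ≤ p.1 then
    if PySem.List.pyGetD p.2 y "" == "#" then (some p.1, st.2 ++ [p.2])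
    else (st.1, st.2 ++ [pvPut p.2 y "X"])
  else (st.1, st.2 ++ [p.2])

def walk_down_alt (grid : List (List String)) (agent_position : Int × Int) :
    List (List String) × (Int × Int) :=
  let x := agent_position.1
  let y := agent_position.2
  let res := (PySem.List.enumerate grid 0).foldl (walkB_step x y) (none, [])
  match res.1 with
  | none => (res.2, ((grid.length : Int) - 1, y))
  | some s =>
      (PySem.List.pySetD res.2 (s - 1)
        (pvPut (PySem.List.pyGetD res.2 (s - 1) []) y "v"), (s - 1, y))

-- ===== PRECONDITION & SPEC =====
-- Pre_ excludes inputs on which A raises IndexError (an out-of-range column index y on a row the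
-- walk reaches, or on the row receiving the final 'v'), and restricts the starting row to the
-- natural domain 0 ≤ x: a negative starting row only returns through Python's negative-index
-- wraparound (an accident of indexing, where A scans "rows" at negative indices).
def Pre_walk_down (grid : List (List String)) (agent_position : Int × Int) : Prop :=
  0 ≤ agent_position.1 ∧
  (∀ i, i < grid.length → agent_position.1.toNat ≤ i →
    (∀ j, j < i → agent_position.1.toNat ≤ j →
      PySem.List.pyGetD (grid.getD j []) agent_position.2 "" ≠ "#") →
    PySem.Raise.InRange (grid.getD i []).length agent_position.2) ∧
  (agent_position.1 < (grid.length : Int) →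
    PySem.List.pyGetD (grid.getD agent_position.1.toNat []) agent_position.2 "" = "#" →
    PySem.Raise.InRange
      (grid.getD ((agent_position.1.toNat + grid.length - 1) % grid.length) []).length
      agent_position.2)
instance (grid : List (List String)) (agent_position : Int × Int) :
    Decidable (Pre_walk_down grid agent_position) := by unfold Pre_walk_down; infer_instance

def pvWitness_walk_down : List (List String) × (Int × Int) :=
  ([[".", "."], ["#", "."]], (0, 0))

def Spec_walk_down (grid : List (List String)) (agent_position : Int × Int)
    (out : List (List String) × (Int × Int)) : Prop := out = walk_down_alt grid agent_position
instance (grid : List (List String)) (agent_position : Int × Int)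
    (out : List (List String) × (Int × Int)) : Decidable (Spec_walk_down grid agent_position out) := by
  unfold Spec_walk_down; infer_instance

-- ===== CLAIM (what is proved, stated in full; the proofs are below) =====
def Claim_equal_walk_down : Prop := ∀ (grid : List (List String)) (agent_position : Int × Int), Dom_walk_down grid agent_position → Pre_walk_down grid agent_position → Spec_walk_down grid agent_position (walk_down grid agent_position)

-- ===== LEMMAS AND PROOFS =====

-- once stop is set, the fold appends every remaining row unchanged
theorem foldB_stopped (x y : Int) :
    ∀ (l : List (Int × List String)) (s : Int) (acc : List (List String)),
    l.foldl (walkB_step x y) (some s, acc) = (some s, acc ++ l.map (·.2)) := by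
  intro l
  induction l with
  | nil => intro s acc; simp
  | cons p l' ih =>
    intro s acc
    rw [List.foldl_cons]
    have h : walkB_step x y (some s, acc) p = (some s, acc ++ [p.2]) := by
      simp [walkB_step]
    rw [h, ih]
    simp

-- rows strictly before the starting row x are copied unchanged
theorem foldB_prefix (x y : Int) :
    ∀ (l : List (List String)) (s : Int) (acc : List (List String)),
    s + l.length ≤ x →
    (PySem.List.enumerate l s).foldl (walkB_step x y) (none, acc) = (none, acc ++ l) := by
  intro l
  induction l with
  | nil => intro s acc _; simp [PySem.List.enumerate_nil]
  | cons r l' ih =>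
    intro s acc h
    rw [PySem.List.enumerate_cons, List.foldl_cons]
    have hs : ¬ x ≤ s := by simp at h; omega
    have hstep : walkB_step x y (none, acc) (s, r) = (none, acc ++ [r]) := by
      simp [walkB_step, hs]
    rw [hstep, ih (s + 1) (acc ++ [r]) (by simp at h ⊢; omega)]
    simp

-- main invariant: A's interleaved walk from row j equals B's fold over the enumerated suffix
theorem walkAB_main (x y : Int) :
    ∀ (rows : List (List String)) (j : Nat) (grid : List (List String)),
    grid.drop j = rows → x ≤ (j : Int) →
    walkA_go y grid (j : Int) rows.length =
      (match ((PySem.List.enumerate rows (j : Int)).foldl (walkB_step x y)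
               (none, grid.take j)).1 with
       | none =>
          (((PySem.List.enumerate rows (j : Int)).foldl (walkB_step x y)
             (none, grid.take j)).2, ((grid.length : Int) - 1, y))
       | some s =>
          (PySem.List.pySetD
             ((PySem.List.enumerate rows (j : Int)).foldl (walkB_step x y)
               (none, grid.take j)).2 (s - 1)
             (pvPut (PySem.List.pyGetD
               ((PySem.List.enumerate rows (j : Int)).foldl (walkB_step x y)
                 (none, grid.take j)).2 (s - 1) []) y "v"), (s - 1, y))) := by
  intro rows
  induction rows with
  | nil =>
    intro j grid hdrop _
    have hlen : grid.length ≤ j := by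
      have := List.drop_eq_nil_iff.mp hdrop
      omega
    simp [PySem.List.enumerate_nil, walkA_go, List.take_of_length_le hlen]
  | cons row rows' ih =>
    intro j grid hdrop hx
    have hj : j < grid.length := by
      by_contra h
      rw [List.drop_eq_nil_of_le (by omega)] at hdrop
      exact List.cons_ne_nil _ _ hdrop.symm
    have hrow : grid[j] = row := by
      have h0 : (grid.drop j)[0]'(by simp [hdrop]) = row := by simp [hdrop]
      rw [List.getElem_drop] at h0
      simpa using h0
    have hcell : pvCell grid (j : Int) y = PySem.List.pyGetD row y "" := by
      unfold pvCell
      rw [PySem.List.pyGetD_natCast, List.getD_eq_getElem _ _ hj, hrow]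
    rw [PySem.List.enumerate_cons, List.length_cons]
    unfold walkA_go
    by_cases hc : PySem.List.pyGetD row y "" == "#"
    · -- obstacle found at row j
      have hstep : walkB_step x y (none, grid.take j) ((j : Int), row)
          = (some (j : Int), grid.take j ++ [row]) := by
        simp [walkB_step, hx, hc]
      rw [List.foldl_cons, hstep, foldB_stopped x y _ (j : Int) _]
      have hfull : (grid.take j ++ [row]) ++ (PySem.List.enumerate rows' ((j : Int) + 1)).map (·.2)
          = grid := by
        rw [PySem.List.map_snd_enumerate, List.append_assoc]
        have : row :: rows' = grid.drop j := hdrop.symm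
        simp [this]
      simp only [hcell, hc, if_true]
      simp only [hfull]
      rfl
    · -- no obstacle: mark with 'X' and continue
      have hstep : walkB_step x y (none, grid.take j) ((j : Int), row)
          = (none, grid.take j ++ [pvPut row y "X"]) := by
        simp [walkB_step, hx, hc]
      rw [List.foldl_cons, hstep]
      simp only [hcell, hc, Bool.false_eq_true, if_false]
      have hset : pvSetCell grid (j : Int) y "X" = grid.set j (pvPut row y "X") := by
        unfold pvSetCell pvPut
        rw [PySem.List.pyGetD_natCast, PySem.List.pySetD_natCast,
            List.getD_eq_getElem _ _ hj, hrow]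
      have hdrop' : (grid.set j (pvPut row y "X")).drop (j + 1) = rows' := by
        rw [List.drop_set_of_lt (Nat.lt_succ_self j)]
        have : grid.drop (j + 1) = (grid.drop j).drop 1 := by
          rw [List.drop_drop]
        rw [this, hdrop]; rfl
      have htake' : (grid.set j (pvPut row y "X")).take (j + 1)
          = grid.take j ++ [pvPut row y "X"] := by
        rw [List.take_add_one, List.take_set_of_le (le_refl j)]
        simp [hj]
      have hlen' : (grid.set j (pvPut row y "X")).length = grid.length := by simp
      have := ih (j + 1) (grid.set j (pvPut row y "X")) hdrop' (by omega)
      rw [htake'] at this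
      push_cast at this ⊢
      rw [hset, this, hlen']

-- ===== VERDICT (by name: the statement is the Claim_ definition above) =====
theorem walk_down_spec : Claim_equal_walk_down := by
  intro grid ap _ hpre
  obtain ⟨hx, -, -⟩ := hpre
  unfold Spec_walk_down walk_down
  simp only [walk_down_alt]
  by_cases hle : ap.1 ≤ (grid.length : Int)
  · -- split the enumeration at the starting row t = x.toNat
    set t := ap.1.toNat with ht
    have hts : grid = grid.take t ++ grid.drop t := (List.take_append_drop t grid).symm
    have hlt : (grid.take t).length = t := by
      rw [List.length_take, Nat.min_eq_left (by omega)]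
    have henum : PySem.List.enumerate grid 0
        = PySem.List.enumerate (grid.take t) 0 ++
          PySem.List.enumerate (grid.drop t) (0 + (grid.take t).length) := by
      conv_lhs => rw [hts]
      exact PySem.List.enumerate_append ..
    rw [henum, List.foldl_append,
        foldB_prefix ap.1 ap.2 (grid.take t) 0 [] (by rw [hlt]; omega)]
    have hfuel : (grid.length - ap.1).toNat = (grid.drop t).length := by
      simp [List.length_drop]; omega
    have hcast : ((0 : Int) + (grid.take t).length) = (t : Int) := by
      rw [hlt]; omega
    have hxt : ap.1 = (t : Int) := by omega
    have := walkAB_main ap.1 ap.2 (grid.drop t) t grid rfl (by omega)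
    rw [hcast, hfuel, hxt]
    rw [hxt] at this
    simpa using this
  · -- starting row beyond the grid: A's loop body never runs, B's scan never fires
    have h0 : (grid.length - ap.1).toNat = 0 := by omega
    rw [h0]
    have hpre' : (0 : Int) + grid.length ≤ ap.1 := by omega
    rw [foldB_prefix ap.1 ap.2 grid 0 [] (by omega)]
    simp [walkA_go]
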